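-- pv_equiv track=rewrite | github.com/immo/pyTOM | df/df_keyboard.py | possible_partial_key_chords
-- ===== SOURCE A (Python) =====
-- def possible_partial_key_chords(keys):
--     p = {}
--     for k in keys:
--         s = k.split("-")
--         x = ""
--         for i in range(len(s)):
--             if i:
--                 x += "-"
--             x += s[i]
--             p[x] = 1
--     return p
-- ===== SOURCE B (Python) =====
-- def _prefix_chords(k):
--     res = []
--     pre = ''
--     for c in k:
--         if c == '-':
--             res.append(pre)
--         pre += c
--     res.append(k)
--     return res
--
-- def possible_partial_key_chords(keys):
--     p = {}
--     for k in keys: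
--         for q in _prefix_chords(k):
--             p[q] = 1
--     return p
-- ===== Notes on version B (the rewrite author's own statement) =====
-- stated objective: alternative
-- what changed: B drops A's split('-')/rejoin pipeline: a helper scans each key character by character with a running-prefix accumulator, emitting the current prefix at every '-' and the whole key at the end, and the main loop just registers those emitted chords.
import Mathlib
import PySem

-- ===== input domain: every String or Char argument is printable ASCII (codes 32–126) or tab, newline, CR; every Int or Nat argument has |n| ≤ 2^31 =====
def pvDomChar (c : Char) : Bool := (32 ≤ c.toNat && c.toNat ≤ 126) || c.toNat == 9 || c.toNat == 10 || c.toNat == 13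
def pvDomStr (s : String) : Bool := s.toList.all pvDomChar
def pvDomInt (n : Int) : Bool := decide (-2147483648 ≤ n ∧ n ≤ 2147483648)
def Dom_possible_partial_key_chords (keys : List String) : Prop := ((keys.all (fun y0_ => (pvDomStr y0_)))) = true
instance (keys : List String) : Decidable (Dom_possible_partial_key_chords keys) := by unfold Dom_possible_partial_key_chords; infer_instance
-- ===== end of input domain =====

-- B replaces A's split('-')/rejoin pipeline by a character scan with a running-prefix accumulator
-- that emits the current prefix at every '-' and the full key at the end (alternative decomposition, same cost).

-- ===== PORT A =====
-- dict keys are carried as List Char and converted to String in the returned items (Lean's own String ops are kernel-opaque)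
def possible_partial_key_chords (keys : List String) : List (String × Int) :=
  (keys.foldl (fun (p : PySem.Dict (List Char) Int) k =>
      let s := PySem.Chars.splitOn k.toList ['-']
      ((PySem.List.pyRange 0 (s.length : Int) 1).foldl
        (fun (st : List Char × PySem.Dict (List Char) Int) i =>
          let x := if i ≠ 0 then st.1 ++ ['-'] else st.1
          let x := x ++ PySem.List.pyGetD s i []
          (x, st.2.insert x 1)) ([], p)).2)
    PySem.Dict.empty).items.map (fun kv => (String.ofList kv.1, kv.2))

-- ===== PORT B =====
-- helper _prefix_chords: scan the key, collecting the running prefix at each '-', then the whole key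
def pvPrefixChords (k : String) : List (List Char) :=
  (k.toList.foldl
      (fun (st : List Char × List (List Char)) c =>
        (st.1 ++ [c], if c = '-' then st.2 ++ [st.1] else st.2))
      ([], [])).2 ++ [k.toList]

def possible_partial_key_chords_alt (keys : List String) : List (String × Int) :=
  (keys.foldl (fun (p : PySem.Dict (List Char) Int) k =>
      (pvPrefixChords k).foldl (fun d q => d.insert q 1) p)
    PySem.Dict.empty).items.map (fun kv => (String.ofList kv.1, kv.2))

-- ===== PRECONDITION & SPEC =====
def Spec_possible_partial_key_chords (keys : List String) (out : List (String × Int)) : Prop := out = possible_partial_key_chords_alt keys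
instance (keys : List String) (out : List (String × Int)) : Decidable (Spec_possible_partial_key_chords keys out) := by unfold Spec_possible_partial_key_chords; infer_instance

-- ===== CLAIM (what is proved, stated in full; the proofs are below) =====
def Claim_equal_possible_partial_key_chords : Prop := ∀ (keys : List String), Dom_possible_partial_key_chords keys → Spec_possible_partial_key_chords keys (possible_partial_key_chords keys)

-- ===== LEMMAS AND PROOFS =====

-- single-'-' splitter: the structural form of PySem.Chars.splitOn cs ['-']
def pvSplit1 : List Char → List (List Char)
| [] => [[]]
| c :: cs =>
  if c = '-' then [] :: pvSplit1 cs
  else match pvSplit1 cs with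
    | [] => []
    | t :: ts => (c :: t) :: ts

def pvConsHead (pre : List Char) : List (List Char) → List (List Char)
| [] => [pre]
| t :: ts => (pre ++ t) :: ts

theorem pvSplit1_ne_nil (cs : List Char) : pvSplit1 cs ≠ [] := by
  induction cs with
  | nil => simp [pvSplit1]
  | cons c cs ih =>
    simp only [pvSplit1]
    split
    · simp
    · cases h : pvSplit1 cs with
      | nil => exact absurd h ih
      | cons t ts => simp

theorem go_eq (cs : List Char) : ∀ (fuel : Nat) (cur acc : _), cs.length < fuel →
    PySem.Chars.splitOn.go ['-'] fuel cs cur acc = acc.reverse ++ pvConsHead cur.reverse (pvSplit1 cs) := by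
  induction cs with
  | nil =>
    intro fuel cur acc h
    match fuel with
    | f + 1 => simp [PySem.Chars.splitOn.go, pvSplit1, pvConsHead]
  | cons c rest ih =>
    intro fuel cur acc h
    match fuel with
    | f + 1 =>
      rw [PySem.Chars.splitOn.go]
      by_cases hc : c = '-'
      · subst hc
        simp only [List.isPrefixOf, BEq.rfl, Bool.true_and, if_pos, List.length_singleton, List.drop_succ_cons, List.drop_zero]
        rw [ih f [] (cur.reverse :: acc) (by simpa using Nat.lt_of_succ_lt_succ h)]
        cases hs : pvSplit1 rest with
        | nil => exact absurd hs (pvSplit1_ne_nil rest)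
        | cons t ts => simp [pvSplit1, hs, pvConsHead]
      · have : (['-'].isPrefixOf (c :: rest)) = false := by
          simp [List.isPrefixOf]
          exact fun hh => absurd hh.symm hc
        rw [if_neg (by simp [this])]
        rw [ih f (c :: cur) acc (by simpa using Nat.lt_of_succ_lt_succ h)]
        cases hs : pvSplit1 rest with
        | nil => exact absurd hs (pvSplit1_ne_nil rest)
        | cons t ts => simp [pvSplit1, hc, hs, pvConsHead]

theorem splitOn_eq (cs : List Char) : PySem.Chars.splitOn cs ['-'] = pvSplit1 cs := by
  rw [PySem.Chars.splitOn, go_eq cs (cs.length + 1) [] [] (by omega)]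
  cases hs : pvSplit1 cs with
  | nil => exact absurd hs (pvSplit1_ne_nil cs)
  | cons t ts => simp [pvConsHead]

-- the prefixes emitted at each '-' offset
def pvHp : List Char → List (List Char)
| [] => []
| c :: cs => (if c = '-' then [[]] else []) ++ (pvHp cs).map (c :: ·)

-- the keys A's inner loop inserts after the first token, given the running prefix x
def pvJoins (x : List Char) : List (List Char) → List (List Char)
| [] => []
| e :: ts => (x ++ '-' :: e) :: pvJoins (x ++ '-' :: e) ts

def pvJLast (x : List Char) : List (List Char) → List Char
| [] => x
| e :: ts => pvJLast (x ++ '-' :: e) ts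

theorem pvJoins_cons (ts : List (List Char)) : ∀ (c : Char) (x : List Char),
    pvJoins (c :: x) ts = (pvJoins x ts).map (c :: ·) := by
  induction ts with
  | nil => intro c x; simp [pvJoins]
  | cons e ts ih =>
    intro c x
    simp only [pvJoins, List.map_cons, List.cons_append]
    rw [ih c (x ++ '-' :: e)]

def pvScan : List (List Char) → List (List Char)
| [] => []
| t :: ts => t :: pvJoins t ts

-- core combinatorial fact: A's cumulative joins over the tokens = the '-'-offset prefixes ++ the full key
theorem scan_split1 (cs : List Char) : pvScan (pvSplit1 cs) = pvHp cs ++ [cs] := by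
  induction cs with
  | nil => simp [pvSplit1, pvScan, pvJoins, pvHp]
  | cons c cs ih =>
    cases hs : pvSplit1 cs with
    | nil => exact absurd hs (pvSplit1_ne_nil cs)
    | cons t ts =>
      by_cases hc : c = '-'
      · subst hc
        have ih' : t :: pvJoins t ts = pvHp cs ++ [cs] := by simpa [pvScan, hs] using ih
        show pvScan (pvSplit1 ('-' :: cs)) = _
        simp only [pvSplit1, hs, pvScan, pvHp, pvJoins, if_true, List.nil_append, pvJoins_cons, eq_self_iff_true, ite_true]
        have h2 : (t :: pvJoins t ts).map ('-' :: ·) = (pvHp cs ++ [cs]).map ('-' :: ·) := by rw [ih']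
        simp only [List.map_cons] at h2
        simp [h2]
      · have ih' : t :: pvJoins t ts = pvHp cs ++ [cs] := by simpa [pvScan, hs] using ih
        show pvScan (pvSplit1 (c :: cs)) = _
        simp only [pvSplit1, if_neg hc, hs, pvScan, pvHp]
        rw [pvJoins_cons]
        have h2 : (t :: pvJoins t ts).map (c :: ·) = (pvHp cs ++ [cs]).map (c :: ·) := by rw [ih']
        simp only [List.map_cons] at h2
        simp [h2]

theorem A_fold (ts : List (List Char)) : ∀ (x : List Char) (p : PySem.Dict (List Char) Int),
    List.foldl (fun (st : List Char × PySem.Dict (List Char) Int) e =>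
        (st.1 ++ '-' :: e, st.2.insert (st.1 ++ '-' :: e) 1)) (x, p) ts
    = (pvJLast x ts, List.foldl (fun d k => d.insert k 1) p (pvJoins x ts)) := by
  induction ts with
  | nil => intro x p; simp [pvJLast, pvJoins]
  | cons e ts ih =>
    intro x p
    simp only [List.foldl_cons, pvJLast, pvJoins]
    exact ih (x ++ '-' :: e) (p.insert (x ++ '-' :: e) 1)

theorem A_perkey (cs : List Char) (p : PySem.Dict (List Char) Int) :
    ((PySem.List.pyRange 0 ((PySem.Chars.splitOn cs ['-']).length : Int) 1).foldl
      (fun (st : List Char × PySem.Dict (List Char) Int) i =>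
        let x := if i ≠ 0 then st.1 ++ ['-'] else st.1
        let x := x ++ PySem.List.pyGetD (PySem.Chars.splitOn cs ['-']) i []
        (x, st.2.insert x 1)) ([], p)).2
    = List.foldl (fun d k => d.insert k 1) p (pvHp cs ++ [cs]) := by
  rw [splitOn_eq]
  cases hs : pvSplit1 cs with
  | nil => exact absurd hs (pvSplit1_ne_nil cs)
  | cons t ts =>
    rw [PySem.List.pyRange_one_cons (by exact_mod_cast ts.length.succ_pos)]
    simp only [List.foldl_cons, ne_eq, not_true_eq_false, if_false,
      PySem.List.pyGetD_zero_cons, List.nil_append, zero_add, ite_self]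
    rw [PySem.List.foldl_congr_mem _ _ (fun (st : List Char × PySem.Dict (List Char) Int) j =>
        (st.1 ++ '-' :: PySem.List.pyGetD (t :: ts) j [],
         st.2.insert (st.1 ++ '-' :: PySem.List.pyGetD (t :: ts) j []) 1)) _
      (by
        intro acc j hj
        have h1j : 1 ≤ j := (PySem.List.mem_pyRange_one.mp hj).1
        rw [if_pos (by omega)]
        simp [List.append_assoc])]
    rw [PySem.List.foldl_pyRange_pyGetD' (t :: ts) []
      (fun (st : List Char × PySem.Dict (List Char) Int) e => (st.1 ++ '-' :: e, st.2.insert (st.1 ++ '-' :: e) 1))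
      (t, p.insert t 1) (by norm_num)]
    simp only [Int.toNat_one, List.drop_succ_cons, List.drop_zero]
    rw [A_fold]
    have hsc := scan_split1 cs
    rw [hs] at hsc
    simp only [pvScan] at hsc
    rw [← hsc]
    simp [List.foldl_cons]

-- B's character scan computes (pre ++ cs, res ++ the '-'-offset prefixes of cs shifted by pre)
theorem B_scan (cs : List Char) : ∀ (pre : List Char) (res : List (List Char)),
    cs.foldl (fun (st : List Char × List (List Char)) c =>
        (st.1 ++ [c], if c = '-' then st.2 ++ [st.1] else st.2)) (pre, res)
    = (pre ++ cs, res ++ (pvHp cs).map (pre ++ ·)) := by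
  induction cs with
  | nil => intro pre res; simp [pvHp]
  | cons c cs ih =>
    intro pre res
    simp only [List.foldl_cons]
    rw [ih (pre ++ [c])]
    by_cases hc : c = '-'
    · subst hc
      simp [pvHp, Function.comp_def]
    · simp [pvHp, hc, Function.comp_def]

theorem B_perkey (k : String) (p : PySem.Dict (List Char) Int) :
    (pvPrefixChords k).foldl (fun d q => d.insert q 1) p
    = List.foldl (fun d q => d.insert q 1) p (pvHp k.toList ++ [k.toList]) := by
  unfold pvPrefixChords
  rw [B_scan k.toList [] []]
  simp

-- ===== VERDICT (by name: the statement is the Claim_ definition above) =====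
theorem possible_partial_key_chords_spec : Claim_equal_possible_partial_key_chords := by
  intro keys _
  unfold Spec_possible_partial_key_chords possible_partial_key_chords possible_partial_key_chords_alt
  have hstep : ∀ (p : PySem.Dict (List Char) Int) (k : String),
      (let s := PySem.Chars.splitOn k.toList ['-']
       ((PySem.List.pyRange 0 (s.length : Int) 1).foldl
        (fun (st : List Char × PySem.Dict (List Char) Int) i =>
          let x := if i ≠ 0 then st.1 ++ ['-'] else st.1
          let x := x ++ PySem.List.pyGetD s i []
          (x, st.2.insert x 1)) ([], p)).2)
      = (pvPrefixChords k).foldl (fun d q => d.insert q 1) p :=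
    fun p k => (A_perkey k.toList p).trans (B_perkey k p).symm
  rw [PySem.List.foldl_congr_mem keys _ _ PySem.Dict.empty (fun acc k _ => hstep acc k)]
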